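-- pv_equiv track=rewrite | github.com/Adrix115-ux/It-Will-Rain-on-my-Parade- | ClimatoLogic/ClimatoLogic.py | aligned_months_core
-- ===== SOURCE A (Python) =====
-- from typing import Dict, List, Tuple, Optional, Any
--
-- def aligned_months_core(series_main: Dict[str, Dict[str, float]],
--                         neigh_list: List[Dict[str, Dict[str, float]]],
--                         core_vars: List[str]) -> List[str]:
--     sets = []
--     for v in core_vars:
--         mv = series_main.get(v, {})
--         if not mv:
--             return []
--         sets.append(set(mv.keys()))
--     common = set.intersection(*sets) if sets else set()
--     if not common:
--         return []
--     for neigh in neigh_list: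
--         for v in core_vars:
--             sv = neigh.get(v, {})
--             if not sv:
--                 return []
--             common = common & set(sv.keys())
--             if not common:
--                 return []
--     return sorted(common)
-- ===== SOURCE B (Python) =====
-- from collections import Counter
--
-- def aligned_months_core(series_main, neigh_list, core_vars):
--     counter = Counter()
--     groups = 0
--     for v in core_vars:
--         counter.update(series_main.get(v, {}).keys())
--         groups += 1
--     for neigh in neigh_list:
--         for v in core_vars:
--             counter.update(neigh.get(v, {}).keys())
--             groups += 1
--     return sorted(k for k, c in counter.items() if c == groups)
-- ===== Notes on version B (the rewrite author's own statement) =====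
-- stated objective: alternative
-- what changed: Replaces the early-exit set-intersection chain (building a set per group and repeatedly intersecting) with a single counting pass: one Counter is incremented over every group's keys and the keys whose count equals the number of groups are kept.
import Mathlib
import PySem

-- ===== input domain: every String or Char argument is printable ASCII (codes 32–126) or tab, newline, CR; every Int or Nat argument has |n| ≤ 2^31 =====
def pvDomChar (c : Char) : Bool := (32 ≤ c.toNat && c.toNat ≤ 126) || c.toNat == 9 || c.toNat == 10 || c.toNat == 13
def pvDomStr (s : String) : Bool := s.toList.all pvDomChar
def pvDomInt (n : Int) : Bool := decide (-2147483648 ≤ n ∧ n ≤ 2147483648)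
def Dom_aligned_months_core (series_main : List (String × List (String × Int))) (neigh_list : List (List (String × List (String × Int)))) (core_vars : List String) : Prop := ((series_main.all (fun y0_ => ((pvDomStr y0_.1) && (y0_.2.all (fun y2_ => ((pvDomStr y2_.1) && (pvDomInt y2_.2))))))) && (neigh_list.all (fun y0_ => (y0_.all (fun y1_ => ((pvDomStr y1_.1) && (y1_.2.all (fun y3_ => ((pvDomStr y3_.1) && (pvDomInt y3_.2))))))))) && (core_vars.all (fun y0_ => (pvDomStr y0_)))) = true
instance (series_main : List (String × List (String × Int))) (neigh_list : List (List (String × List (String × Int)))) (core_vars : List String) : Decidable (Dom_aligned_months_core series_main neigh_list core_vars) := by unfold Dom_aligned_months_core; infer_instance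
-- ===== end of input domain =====

-- B replaces A's early-exit set-intersection chain by one counting pass over all groups' keys
-- (keep the keys counted in every group), a different algorithm of similar cost.


-- ===== PORT A =====
-- shared helper: the key set (dict keys, first occurrences) of d.get(v, {})
def pvKeysOf (d : List (String × List (String × Int))) (v : String) : List String :=
  PySem.Set.ofList (((PySem.Dict.ofList d).getD v []).map Prod.fst)

-- A's first loop: collect set(mv.keys()) per core var, 'return []' (none) on an empty dict
def pvSetsA (sm : List (String × List (String × Int))) : List String → Option (List (List String))
  | [] => some []
  | v :: rest =>
    let mv := (PySem.Dict.ofList sm).getD v []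
    if mv = [] then none
    else match pvSetsA sm rest with
      | none => none
      | some s => some (PySem.Set.ofList (mv.map Prod.fst) :: s)

-- the inner 'for v in core_vars' loop of A's neighbour pass, with its two early returns
def pvInnerA (neigh : List (String × List (String × Int))) : List String → PySem.Set String → Option (PySem.Set String)
  | [], c => some c
  | v :: rest, c =>
    let sv := (PySem.Dict.ofList neigh).getD v []
    if sv = [] then none
    else
      let c' := PySem.Set.inter c (PySem.Set.ofList (sv.map Prod.fst))
      if c' = [] then none else pvInnerA neigh rest c'

-- the outer 'for neigh in neigh_list' loop
def pvNeighA (cv : List String) : List (List (String × List (String × Int))) → PySem.Set String → Option (PySem.Set String)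
  | [], c => some c
  | n :: rest, c => match pvInnerA n cv c with
      | none => none
      | some c' => pvNeighA cv rest c'

def aligned_months_core (series_main : List (String × List (String × Int))) (neigh_list : List (List (String × List (String × Int)))) (core_vars : List String) : List String :=
  match pvSetsA series_main core_vars with
  | none => []
  | some sets =>
    let common : PySem.Set String := match sets with
      | [] => PySem.Set.empty
      | s :: rest => rest.foldl PySem.Set.inter s
    if common = [] then []
    else match pvNeighA core_vars neigh_list common with
      | none => []
      | some c => PySem.List.sorted c (fun x => x) false

-- ===== PORT B =====
-- counter.update(ks): add 1 to each key's count
def pvUpd (d : PySem.Dict String Int) (ks : List String) : PySem.Dict String Int :=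
  ks.foldl (fun d k => d.modify k 0 (· + 1)) d

def aligned_months_core_alt (series_main : List (String × List (String × Int))) (neigh_list : List (List (String × List (String × Int)))) (core_vars : List String) : List String :=
  let p1 := core_vars.foldl (fun (p : PySem.Dict String Int × Int) v => (pvUpd p.1 (pvKeysOf series_main v), p.2 + 1)) (PySem.Dict.empty, 0)
  let p2 := neigh_list.foldl (fun p neigh => core_vars.foldl (fun (q : PySem.Dict String Int × Int) v => (pvUpd q.1 (pvKeysOf neigh v), q.2 + 1)) p) p1
  PySem.List.sorted ((p2.1.items.filter (fun kc => kc.2 == p2.2)).map Prod.fst) (fun x => x) false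

-- ===== PRECONDITION & SPEC =====
def Spec_aligned_months_core (series_main : List (String × List (String × Int))) (neigh_list : List (List (String × List (String × Int)))) (core_vars : List String) (out : List String) : Prop := out = aligned_months_core_alt series_main neigh_list core_vars
instance (series_main : List (String × List (String × Int))) (neigh_list : List (List (String × List (String × Int)))) (core_vars : List String) (out : List String) : Decidable (Spec_aligned_months_core series_main neigh_list core_vars out) := by unfold Spec_aligned_months_core; infer_instance

-- ===== CLAIM (what is proved, stated in full; the proofs are below) =====
def Claim_equal_aligned_months_core : Prop := ∀ (series_main : List (String × List (String × Int))) (neigh_list : List (List (String × List (String × Int)))) (core_vars : List String), Dom_aligned_months_core series_main neigh_list core_vars → Spec_aligned_months_core series_main neigh_list core_vars (aligned_months_core series_main neigh_list core_vars)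

-- ===== LEMMAS AND PROOFS =====

-- the list of key-groups both programs range over, in processing order
def pvGL (sm : List (String × List (String × Int))) (nl : List (List (String × List (String × Int)))) (cv : List String) : List (List String) :=
  cv.map (pvKeysOf sm) ++ nl.flatMap (fun n => cv.map (pvKeysOf n))

-- B's result list before sorting: the keys counted once per group
def pvLB (sm : List (String × List (String × Int))) (nl : List (List (String × List (String × Int)))) (cv : List String) : List String :=
  (PySem.Set.ofList ((pvGL sm nl cv).flatMap id)).filter
    (fun k => ((((pvGL sm nl cv).flatMap id).count k : Int)) == (((pvGL sm nl cv).length : Nat) : Int))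

theorem pvKeysOf_nodup (d : List (String × List (String × Int))) (v : String) : (pvKeysOf d v).Nodup := by
  unfold pvKeysOf; exact PySem.Set.nodup_ofList _

theorem pvKeysOf_eq_nil (d : List (String × List (String × Int))) (v : String) :
    pvKeysOf d v = [] ↔ (PySem.Dict.ofList d).getD v [] = [] := by
  unfold pvKeysOf
  constructor
  · intro h
    cases hmv : (PySem.Dict.ofList d).getD v [] with
    | nil => rfl
    | cons p rest =>
        exfalso
        have hm : p.1 ∈ PySem.Set.ofList (((PySem.Dict.ofList d).getD v []).map Prod.fst) := by
          rw [PySem.Set.mem_ofList, hmv]; simp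
        rw [h] at hm; simp at hm
  · intro h; rw [h]; rfl

theorem pvMem_GL_main (sm : List (String × List (String × Int))) (nl : List (List (String × List (String × Int)))) (cv : List String) (v : String) (hv : v ∈ cv) : pvKeysOf sm v ∈ pvGL sm nl cv := by
  unfold pvGL; exact List.mem_append.mpr (Or.inl (List.mem_map.mpr ⟨v, hv, rfl⟩))

theorem pvMem_GL_neigh (sm : List (String × List (String × Int))) (nl : List (List (String × List (String × Int)))) (cv : List String) (n : List (String × List (String × Int))) (v : String) (hn : n ∈ nl) (hv : v ∈ cv) : pvKeysOf n v ∈ pvGL sm nl cv := by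
  unfold pvGL
  exact List.mem_append.mpr (Or.inr (List.mem_flatMap.mpr ⟨n, hn, List.mem_map.mpr ⟨v, hv, rfl⟩⟩))

theorem pvGL_nodup (sm : List (String × List (String × Int))) (nl : List (List (String × List (String × Int)))) (cv : List String) : ∀ g ∈ pvGL sm nl cv, g.Nodup := by
  intro g hg
  unfold pvGL at hg
  rcases List.mem_append.mp hg with h1 | h2
  · rcases List.mem_map.mp h1 with ⟨v, _, rfl⟩; exact pvKeysOf_nodup _ _
  · rcases List.mem_flatMap.mp h2 with ⟨n, _, hn⟩
    rcases List.mem_map.mp hn with ⟨v, _, rfl⟩; exact pvKeysOf_nodup _ _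

-- B's two folds together build the counter over all groups' keys and count the groups
theorem pvUpd_append (d : PySem.Dict String Int) (a b : List String) :
    pvUpd d (a ++ b) = pvUpd (pvUpd d a) b := by
  unfold pvUpd; exact List.foldl_append

theorem pvCvFold (K : String → List String) (cv : List String) :
    ∀ (d : PySem.Dict String Int) (t : Int),
    cv.foldl (fun (p : PySem.Dict String Int × Int) v => (pvUpd p.1 (K v), p.2 + 1)) (d, t)
    = (pvUpd d (cv.flatMap K), t + (cv.length : Int)) := by
  induction cv with
  | nil => intro d t; simp [pvUpd]
  | cons v vs ih =>
      intro d t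
      simp only [List.foldl_cons, List.flatMap_cons]
      rw [ih, pvUpd_append]
      refine Prod.ext rfl ?_
      simp only [List.length_cons]
      push_cast
      ring

theorem pvNlFold (cv : List String) (nl : List (List (String × List (String × Int)))) :
    ∀ (d : PySem.Dict String Int) (t : Int),
    nl.foldl (fun p neigh => cv.foldl (fun (q : PySem.Dict String Int × Int) v => (pvUpd q.1 (pvKeysOf neigh v), q.2 + 1)) p) (d, t)
    = (pvUpd d (nl.flatMap (fun n => cv.flatMap (pvKeysOf n))), t + (nl.length : Int) * (cv.length : Int)) := by
  induction nl with
  | nil => intro d t; simp [pvUpd]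
  | cons n ns ih =>
      intro d t
      simp only [List.foldl_cons, List.flatMap_cons]
      rw [pvCvFold (pvKeysOf n) cv d t, ih, pvUpd_append]
      refine Prod.ext rfl ?_
      simp only [List.length_cons]
      push_cast
      ring

theorem pvFlatMap_id_map {α β : Type} (f : α → List β) (l : List α) :
    (l.map f).flatMap id = l.flatMap f := by
  induction l with
  | nil => rfl
  | cons a l ih => simp only [List.map_cons, List.flatMap_cons, ih, id]

theorem pvGL_flat (sm : List (String × List (String × Int))) (nl : List (List (String × List (String × Int)))) (cv : List String) :
    (pvGL sm nl cv).flatMap id = cv.flatMap (pvKeysOf sm) ++ nl.flatMap (fun n => cv.flatMap (pvKeysOf n)) := by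
  unfold pvGL
  rw [List.flatMap_append, pvFlatMap_id_map]
  congr 1
  induction nl with
  | nil => rfl
  | cons n ns ih => simp only [List.flatMap_cons, pvFlatMap_id_map, List.flatMap_append, ih]

theorem pvGL_length (sm : List (String × List (String × Int))) (nl : List (List (String × List (String × Int)))) (cv : List String) :
    (pvGL sm nl cv).length = cv.length + nl.length * cv.length := by
  unfold pvGL
  rw [List.length_append, List.length_map]
  congr 1
  induction nl with
  | nil => simp
  | cons n ns ih =>
      simp only [List.flatMap_cons, List.length_append, List.length_map, ih, List.length_cons]
      ring

theorem pvB_fold (sm : List (String × List (String × Int))) (nl : List (List (String × List (String × Int)))) (cv : List String) :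
    (nl.foldl (fun p neigh => cv.foldl (fun (q : PySem.Dict String Int × Int) v => (pvUpd q.1 (pvKeysOf neigh v), q.2 + 1)) p)
      (cv.foldl (fun (p : PySem.Dict String Int × Int) v => (pvUpd p.1 (pvKeysOf sm v), p.2 + 1)) (PySem.Dict.empty, 0)))
    = (PySem.Dict.counter ((pvGL sm nl cv).flatMap id), (((pvGL sm nl cv).length : Nat) : Int)) := by
  rw [pvCvFold (pvKeysOf sm) cv PySem.Dict.empty 0, pvNlFold cv nl, pvGL_flat, pvGL_length]
  rw [← pvUpd_append]
  refine Prod.ext ?_ ?_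
  · rw [PySem.Dict.counter_eq_foldl]; rfl
  · push_cast; ring

-- counting over nodup groups: the count reaches the number of groups iff the key is in every group
theorem pvCount_flatMap (k : String) (gls : List (List String)) (h : ∀ g ∈ gls, g.Nodup) :
    (gls.flatMap id).count k ≤ gls.length ∧ ((gls.flatMap id).count k = gls.length ↔ ∀ g ∈ gls, k ∈ g) := by
  induction gls with
  | nil => simp
  | cons g gs ih =>
      have hg : g.Nodup := h g (by simp)
      obtain ⟨hle, hiff⟩ := ih (fun g' hg' => h g' (List.mem_cons_of_mem _ hg'))
      have h1 : g.count k ≤ 1 := List.nodup_iff_count_le_one.mp hg k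
      have hcnt : ((g :: gs).flatMap id).count k = g.count k + (gs.flatMap id).count k := by
        simp only [List.flatMap_cons, List.count_append, id]
      have hmem : 0 < g.count k ↔ k ∈ g := List.count_pos_iff
      constructor
      · rw [hcnt]; simp only [List.length_cons]; omega
      · rw [hcnt]; simp only [List.length_cons]
        constructor
        · intro he
          have hkg : k ∈ g := hmem.mp (by omega)
          have hrest : (gs.flatMap id).count k = gs.length := by omega
          intro g' hg'
          rcases List.mem_cons.mp hg' with rfl | h'
          exacts [hkg, hiff.mp hrest g' h']
        · intro hall
          have hkg : g.count k = 1 := by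
            have := hmem.mpr (hall g (by simp)); omega
          have hrest : (gs.flatMap id).count k = gs.length :=
            hiff.mpr (fun g' h' => hall g' (List.mem_cons_of_mem _ h'))
          omega

theorem pvMem_LB (sm : List (String × List (String × Int))) (nl : List (List (String × List (String × Int)))) (cv : List String) (k : String) :
    k ∈ pvLB sm nl cv ↔ (pvGL sm nl cv ≠ [] ∧ ∀ g ∈ pvGL sm nl cv, k ∈ g) := by
  obtain ⟨hle, hiff⟩ := pvCount_flatMap k (pvGL sm nl cv) (pvGL_nodup sm nl cv)
  unfold pvLB
  rw [List.mem_filter, PySem.Set.mem_ofList, List.mem_flatMap]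
  simp only [id, beq_iff_eq, Nat.cast_inj]
  constructor
  · rintro ⟨⟨g, hg, hkg⟩, hcnt⟩
    exact ⟨List.ne_nil_of_mem hg, hiff.mp hcnt⟩
  · rintro ⟨hne, hall⟩
    obtain ⟨g, hg⟩ := List.exists_mem_of_ne_nil _ hne
    exact ⟨⟨g, hg, hall g hg⟩, hiff.mpr hall⟩

theorem pvLB_nodup (sm : List (String × List (String × Int))) (nl : List (List (String × List (String × Int)))) (cv : List String) :
    (pvLB sm nl cv).Nodup := by
  unfold pvLB
  exact List.Nodup.filter _ (PySem.Set.nodup_ofList _)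

theorem pvB_char (sm : List (String × List (String × Int))) (nl : List (List (String × List (String × Int)))) (cv : List String) :
    aligned_months_core_alt sm nl cv = PySem.List.sorted (pvLB sm nl cv) (fun x => x) false := by
  simp only [aligned_months_core_alt]
  rw [pvB_fold]
  dsimp only
  rw [PySem.Dict.items_counter, List.filter_map, List.map_map]
  unfold pvLB
  simp [Function.comp_def]

-- A-side loop specifications
theorem pvSetsA_none (sm : List (String × List (String × Int))) (cv : List String) :
    pvSetsA sm cv = none ↔ ∃ v ∈ cv, pvKeysOf sm v = [] := by
  induction cv with
  | nil => simp [pvSetsA]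
  | cons v vs ih =>
      constructor
      · intro hnone
        simp only [pvSetsA] at hnone
        by_cases h : (PySem.Dict.ofList sm).getD v [] = []
        · exact ⟨v, by simp, (pvKeysOf_eq_nil sm v).mpr h⟩
        · rw [if_neg h] at hnone
          cases hr : pvSetsA sm vs with
          | none =>
              obtain ⟨w, hw, hwnil⟩ := ih.mp hr
              exact ⟨w, List.mem_cons_of_mem _ hw, hwnil⟩
          | some s => rw [hr] at hnone; simp at hnone
      · rintro ⟨w, hw, hwnil⟩
        simp only [pvSetsA]
        rcases List.mem_cons.mp hw with rfl | hw'
        · rw [if_pos ((pvKeysOf_eq_nil sm w).mp hwnil)]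
        · by_cases h : (PySem.Dict.ofList sm).getD v [] = []
          · rw [if_pos h]
          · rw [if_neg h, ih.mpr ⟨w, hw', hwnil⟩]

theorem pvSetsA_some (sm : List (String × List (String × Int))) (cv : List String) :
    ∀ s, pvSetsA sm cv = some s → s = cv.map (pvKeysOf sm) := by
  induction cv with
  | nil => intro s h; simp only [pvSetsA] at h; simp [← Option.some.inj h]
  | cons v vs ih =>
      intro s h
      simp only [pvSetsA] at h
      by_cases hv : (PySem.Dict.ofList sm).getD v [] = []
      · rw [if_pos hv] at h; exact absurd h (by simp)
      · rw [if_neg hv] at h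
        cases hr : pvSetsA sm vs with
        | none => rw [hr] at h; exact absurd h (by simp)
        | some s' =>
            rw [hr] at h
            have hs' := ih s' hr
            have := Option.some.inj h
            rw [← this, hs']
            simp only [List.map_cons]
            rfl

theorem pvFoldInter_mem (k : String) (rest : List (List String)) :
    ∀ s : PySem.Set String, k ∈ rest.foldl PySem.Set.inter s ↔ k ∈ s ∧ ∀ t ∈ rest, k ∈ t := by
  induction rest with
  | nil => intro s; simp
  | cons t ts ih =>
      intro s
      simp only [List.foldl_cons]
      rw [ih, PySem.Set.mem_inter]
      constructor
      · rintro ⟨⟨h1, h2⟩, h3⟩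
        refine ⟨h1, fun u hu => ?_⟩
        rcases List.mem_cons.mp hu with rfl | hu'
        exacts [h2, h3 u hu']
      · rintro ⟨h1, h2⟩
        exact ⟨⟨h1, h2 t (by simp)⟩, fun u hu => h2 u (List.mem_cons_of_mem _ hu)⟩

theorem pvFoldInter_nodup (rest : List (List String)) :
    ∀ s : PySem.Set String, s.Nodup → (rest.foldl PySem.Set.inter s).Nodup := by
  induction rest with
  | nil => intro s hs; exact hs
  | cons t ts ih =>
      intro s hs
      simp only [List.foldl_cons]
      exact ih _ (PySem.Set.nodup_inter s t hs)

theorem pvInnerA_spec (neigh : List (String × List (String × Int))) (cv : List String) :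
    ∀ c : PySem.Set String, c.Nodup →
    (∀ c', pvInnerA neigh cv c = some c' → c'.Nodup ∧ ∀ k, (k ∈ c' ↔ k ∈ c ∧ ∀ v ∈ cv, k ∈ pvKeysOf neigh v)) ∧
    (pvInnerA neigh cv c = none → ∀ k, ¬(k ∈ c ∧ ∀ v ∈ cv, k ∈ pvKeysOf neigh v)) := by
  induction cv with
  | nil =>
      intro c hc
      constructor
      · intro c' h
        simp only [pvInnerA] at h
        have := Option.some.inj h
        subst this
        exact ⟨hc, fun k => by simp⟩
      · intro h; simp [pvInnerA] at h
  | cons v vs ih =>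
      intro c hc
      simp only [pvInnerA]
      by_cases hsv : (PySem.Dict.ofList neigh).getD v [] = []
      · rw [if_pos hsv]
        constructor
        · intro c' h; exact absurd h (by simp)
        · rintro _ k ⟨hkc, hall⟩
          have hm := hall v (by simp)
          rw [(pvKeysOf_eq_nil neigh v).mpr hsv] at hm
          simp at hm
      · rw [if_neg hsv]
        have hkv : PySem.Set.ofList (((PySem.Dict.ofList neigh).getD v []).map Prod.fst) = pvKeysOf neigh v := rfl
        rw [hkv]
        by_cases hnil : PySem.Set.inter c (pvKeysOf neigh v) = []
        · rw [if_pos hnil]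
          constructor
          · intro c' h; exact absurd h (by simp)
          · rintro _ k ⟨hkc, hall⟩
            have hm : k ∈ PySem.Set.inter c (pvKeysOf neigh v) :=
              (PySem.Set.mem_inter c _ k).mpr ⟨hkc, hall v (by simp)⟩
            rw [hnil] at hm
            simp at hm
        · rw [if_neg hnil]
          have hnd1 : (PySem.Set.inter c (pvKeysOf neigh v)).Nodup := PySem.Set.nodup_inter c _ hc
          obtain ⟨ihs, ihn⟩ := ih _ hnd1
          constructor
          · intro c' h
            obtain ⟨hnd', hmem⟩ := ihs c' h
            refine ⟨hnd', fun k => ?_⟩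
            rw [hmem k, PySem.Set.mem_inter]
            constructor
            · rintro ⟨⟨h1, h2⟩, h3⟩
              refine ⟨h1, fun u hu => ?_⟩
              rcases List.mem_cons.mp hu with rfl | hu'
              exacts [h2, h3 u hu']
            · rintro ⟨h1, h2⟩
              exact ⟨⟨h1, h2 v (by simp)⟩, fun u hu => h2 u (List.mem_cons_of_mem _ hu)⟩
          · rintro h k ⟨hkc, hall⟩
            exact ihn h k ⟨(PySem.Set.mem_inter c _ k).mpr ⟨hkc, hall v (by simp)⟩,
              fun u hu => hall u (List.mem_cons_of_mem _ hu)⟩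

theorem pvNeighA_spec (cv : List String) (nl : List (List (String × List (String × Int)))) :
    ∀ c : PySem.Set String, c.Nodup →
    (∀ c', pvNeighA cv nl c = some c' → c'.Nodup ∧ ∀ k, (k ∈ c' ↔ k ∈ c ∧ ∀ n ∈ nl, ∀ v ∈ cv, k ∈ pvKeysOf n v)) ∧
    (pvNeighA cv nl c = none → ∀ k, ¬(k ∈ c ∧ ∀ n ∈ nl, ∀ v ∈ cv, k ∈ pvKeysOf n v)) := by
  induction nl with
  | nil =>
      intro c hc
      constructor
      · intro c' h
        simp only [pvNeighA] at h
        have := Option.some.inj h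
        subst this
        exact ⟨hc, fun k => by simp⟩
      · intro h; simp [pvNeighA] at h
  | cons n ns ih =>
      intro c hc
      simp only [pvNeighA]
      cases hi : pvInnerA n cv c with
      | none =>
          constructor
          · intro c' h; exact absurd h (by simp)
          · rintro _ k ⟨hkc, hall⟩
            exact (pvInnerA_spec n cv c hc).2 hi k ⟨hkc, fun v hv => hall n (by simp) v hv⟩
      | some c1 =>
          obtain ⟨hnd1, hm1⟩ := (pvInnerA_spec n cv c hc).1 c1 hi
          obtain ⟨ihs, ihn⟩ := ih c1 hnd1
          constructor
          · intro c' h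
            obtain ⟨hnd', hm'⟩ := ihs c' h
            refine ⟨hnd', fun k => ?_⟩
            rw [hm' k, hm1 k]
            constructor
            · rintro ⟨⟨hkc, hn⟩, hns⟩
              refine ⟨hkc, fun n' hn' => ?_⟩
              rcases List.mem_cons.mp hn' with rfl | h'
              exacts [hn, hns n' h']
            · rintro ⟨hkc, hall⟩
              exact ⟨⟨hkc, hall n (by simp)⟩, fun n' h' => hall n' (List.mem_cons_of_mem _ h')⟩
          · rintro h k ⟨hkc, hall⟩
            exact ihn h k ⟨(hm1 k).mpr ⟨hkc, fun v hv => hall n (by simp) v hv⟩,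
              fun n' h' => hall n' (List.mem_cons_of_mem _ h')⟩

-- ===== VERDICT (by name: the statement is the Claim_ definition above) =====
theorem aligned_months_core_spec : Claim_equal_aligned_months_core := by
  intro sm nl cv _
  show aligned_months_core sm nl cv = aligned_months_core_alt sm nl cv
  rw [pvB_char]
  unfold aligned_months_core
  cases hs : pvSetsA sm cv with
  | none =>
      obtain ⟨v, hv, hnil⟩ := (pvSetsA_none sm cv).mp hs
      have hLBnil : pvLB sm nl cv = [] := by
        apply List.eq_nil_iff_forall_not_mem.mpr
        intro k hk
        obtain ⟨_, hall⟩ := (pvMem_LB sm nl cv k).mp hk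
        have hm := hall (pvKeysOf sm v) (pvMem_GL_main sm nl cv v hv)
        rw [hnil] at hm
        simp at hm
      rw [hLBnil]
      exact ((PySem.List.sorted_eq_nil_iff _ _ _).mpr rfl).symm
  | some sets =>
      have hsets := pvSetsA_some sm cv sets hs
      subst hsets
      cases cv with
      | nil =>
          simp only [List.map_nil]
          have hGLnil : pvGL sm nl [] = [] := by
            unfold pvGL
            simp
          have hLBnil : pvLB sm nl [] = [] := by
            apply List.eq_nil_iff_forall_not_mem.mpr
            intro k hk
            obtain ⟨hne, _⟩ := (pvMem_LB sm nl [] k).mp hk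
            exact hne hGLnil
          rw [hLBnil]
          exact ((PySem.List.sorted_eq_nil_iff _ _ _).mpr rfl).symm
      | cons v vs =>
          simp only [List.map_cons]
          have hnd0 : ((vs.map (pvKeysOf sm)).foldl PySem.Set.inter (pvKeysOf sm v)).Nodup :=
            pvFoldInter_nodup _ _ (pvKeysOf_nodup sm v)
          have hmem0 : ∀ k, k ∈ (vs.map (pvKeysOf sm)).foldl PySem.Set.inter (pvKeysOf sm v) ↔
              ∀ u ∈ v :: vs, k ∈ pvKeysOf sm u := by
            intro k
            rw [pvFoldInter_mem]
            constructor
            · rintro ⟨h1, h2⟩ u hu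
              rcases List.mem_cons.mp hu with rfl | hu'
              exacts [h1, h2 _ (List.mem_map.mpr ⟨u, hu', rfl⟩)]
            · intro hall
              refine ⟨hall v (by simp), fun t ht => ?_⟩
              rcases List.mem_map.mp ht with ⟨u, hu, rfl⟩
              exact hall u (List.mem_cons_of_mem _ hu)
          by_cases h0 : (vs.map (pvKeysOf sm)).foldl PySem.Set.inter (pvKeysOf sm v) = []
          · rw [if_pos h0]
            have hLBnil : pvLB sm nl (v :: vs) = [] := by
              apply List.eq_nil_iff_forall_not_mem.mpr
              intro k hk
              obtain ⟨_, hall⟩ := (pvMem_LB sm nl (v :: vs) k).mp hk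
              have hm : k ∈ (vs.map (pvKeysOf sm)).foldl PySem.Set.inter (pvKeysOf sm v) :=
                (hmem0 k).mpr (fun u hu => hall _ (pvMem_GL_main sm nl (v :: vs) u hu))
              rw [h0] at hm
              simp at hm
            rw [hLBnil]
            exact ((PySem.List.sorted_eq_nil_iff _ _ _).mpr rfl).symm
          · rw [if_neg h0]
            cases hnb : pvNeighA (v :: vs) nl ((vs.map (pvKeysOf sm)).foldl PySem.Set.inter (pvKeysOf sm v)) with
            | none =>
                have hLBnil : pvLB sm nl (v :: vs) = [] := by
                  apply List.eq_nil_iff_forall_not_mem.mpr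
                  intro k hk
                  obtain ⟨_, hall⟩ := (pvMem_LB sm nl (v :: vs) k).mp hk
                  exact (pvNeighA_spec (v :: vs) nl _ hnd0).2 hnb k
                    ⟨(hmem0 k).mpr (fun u hu => hall _ (pvMem_GL_main sm nl (v :: vs) u hu)),
                     fun n hn u hu => hall _ (pvMem_GL_neigh sm nl (v :: vs) n u hn hu)⟩
                rw [hLBnil]
                exact ((PySem.List.sorted_eq_nil_iff _ _ _).mpr rfl).symm
            | some cfin =>
                obtain ⟨hndf, hmf⟩ := (pvNeighA_spec (v :: vs) nl _ hnd0).1 cfin hnb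
                apply PySem.List.sorted_eq_sorted_of_perm _ _ _ (fun a b h => h)
                apply (List.perm_ext_iff_of_nodup hndf (pvLB_nodup sm nl (v :: vs))).mpr
                intro k
                rw [hmf k, pvMem_LB]
                constructor
                · rintro ⟨hk0, hneigh⟩
                  refine ⟨List.ne_nil_of_mem (pvMem_GL_main sm nl (v :: vs) v (by simp)), ?_⟩
                  intro g hg
                  unfold pvGL at hg
                  rcases List.mem_append.mp hg with h1 | h2
                  · rcases List.mem_map.mp h1 with ⟨u, hu, rfl⟩
                    exact (hmem0 k).mp hk0 u hu
                  · rcases List.mem_flatMap.mp h2 with ⟨n, hn, hmm⟩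
                    rcases List.mem_map.mp hmm with ⟨u, hu, rfl⟩
                    exact hneigh n hn u hu
                · rintro ⟨hne, hall⟩
                  exact ⟨(hmem0 k).mpr (fun u hu => hall _ (pvMem_GL_main sm nl (v :: vs) u hu)),
                    fun n hn u hu => hall _ (pvMem_GL_neigh sm nl (v :: vs) n u hn hu)⟩
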